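-- pv_equiv track=rewrite | github.com/axbg/aoc | 2022/day_15/main.py | compute_direction
-- ===== SOURCE A (Python) =====
-- def manhattan_distance(x1, y1, x2, y2):
--     return abs(x1 - x2) + abs(y1 - y2)
--
-- def compute_direction(x, y, increment_y, distance, line_to_check, min_y, max_y):
--     new_x = line_to_check
--     new_y = y
--
--     results = []
--     while manhattan_distance(x, y, line_to_check, new_y) <= distance and min_y <= new_y <= max_y:
--         results.append((new_x, new_y))
--         new_y += increment_y
--
--     return results
-- ===== SOURCE B (Python) =====
-- def compute_direction(x, y, increment_y, distance, line_to_check, min_y, max_y):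
--     dx = abs(x - line_to_check)
--     if dx > distance or not (min_y <= y <= max_y):
--         return []
--     k = (distance - dx) // abs(increment_y)
--     if increment_y > 0:
--         k = min(k, (max_y - y) // increment_y)
--     else:
--         k = min(k, (y - min_y) // (-increment_y))
--     return [(line_to_check, y + i * increment_y) for i in range(k + 1)]
-- ===== Notes on version B (the rewrite author's own statement) =====
-- stated objective: alternative
-- what changed: B replaces A's step-by-step while-loop (re-testing the Manhattan distance and y-bounds at every point) by a closed-form floor-division computation of the number of valid steps, then emits the points with a single comprehension over range(k+1).
import Mathlib
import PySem

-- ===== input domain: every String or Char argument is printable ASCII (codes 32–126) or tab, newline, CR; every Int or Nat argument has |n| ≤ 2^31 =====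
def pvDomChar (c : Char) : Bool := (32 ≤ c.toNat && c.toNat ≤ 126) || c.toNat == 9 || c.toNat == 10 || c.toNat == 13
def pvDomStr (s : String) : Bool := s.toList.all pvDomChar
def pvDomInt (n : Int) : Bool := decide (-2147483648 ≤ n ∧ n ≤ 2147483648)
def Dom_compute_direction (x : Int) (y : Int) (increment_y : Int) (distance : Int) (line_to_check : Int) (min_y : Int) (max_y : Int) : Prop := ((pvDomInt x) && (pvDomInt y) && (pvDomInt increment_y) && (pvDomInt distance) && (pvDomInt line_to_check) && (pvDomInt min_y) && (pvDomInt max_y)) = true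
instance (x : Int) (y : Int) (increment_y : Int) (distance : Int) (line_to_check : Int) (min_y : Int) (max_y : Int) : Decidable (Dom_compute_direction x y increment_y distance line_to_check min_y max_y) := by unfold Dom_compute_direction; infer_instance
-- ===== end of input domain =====

-- B computes the number of emitted points in closed form (floor divisions) instead of
-- stepping a while-loop that re-tests the Manhattan distance at every point (objective: alternative/closed-form).

-- ===== PORT A =====
def manhattan_distance (x1 : Int) (y1 : Int) (x2 : Int) (y2 : Int) : Int := |x1 - x2| + |y1 - y2|

-- A's while-loop as fuel recursion; under Pre_ the supplied fuel (distance.toNat + 1)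
-- exceeds the number of iterations, so it is exactly A's loop.
def computeLoopA (x : Int) (y : Int) (increment_y : Int) (distance : Int) (line_to_check : Int) (min_y : Int) (max_y : Int) : Nat → Int → List (Int × Int)
  | 0, _ => []
  | fuel + 1, new_y =>
    if manhattan_distance x y line_to_check new_y ≤ distance ∧ min_y ≤ new_y ∧ new_y ≤ max_y then
      (line_to_check, new_y) :: computeLoopA x y increment_y distance line_to_check min_y max_y fuel (new_y + increment_y)
    else []

def compute_direction (x : Int) (y : Int) (increment_y : Int) (distance : Int) (line_to_check : Int) (min_y : Int) (max_y : Int) : List (Int × Int) :=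
  computeLoopA x y increment_y distance line_to_check min_y max_y (distance.toNat + 1) y

-- ===== PORT B =====
def compute_direction_alt (x : Int) (y : Int) (increment_y : Int) (distance : Int) (line_to_check : Int) (min_y : Int) (max_y : Int) : List (Int × Int) :=
  let dx := |x - line_to_check|
  if distance < dx ∨ ¬ (min_y ≤ y ∧ y ≤ max_y) then []
  else
    let k0 := PySem.Int.floordiv (distance - dx) |increment_y|
    let k := if 0 < increment_y then min k0 (PySem.Int.floordiv (max_y - y) increment_y)
             else min k0 (PySem.Int.floordiv (y - min_y) (-increment_y))
    (List.range (k + 1).toNat).map (fun (i : Nat) => (line_to_check, y + (i : Int) * increment_y))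

-- ===== PRECONDITION & SPEC =====
-- Pre_ excludes exactly the inputs where increment_y = 0 and the loop condition holds initially:
-- there A never returns (infinite loop) and B raises ZeroDivisionError.
def Pre_compute_direction (x : Int) (y : Int) (increment_y : Int) (distance : Int) (line_to_check : Int) (min_y : Int) (max_y : Int) : Prop :=
  ¬ (increment_y = 0 ∧ |x - line_to_check| ≤ distance ∧ min_y ≤ y ∧ y ≤ max_y)
instance (x : Int) (y : Int) (increment_y : Int) (distance : Int) (line_to_check : Int) (min_y : Int) (max_y : Int) : Decidable (Pre_compute_direction x y increment_y distance line_to_check min_y max_y) := by unfold Pre_compute_direction; infer_instance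

def pvWitness_compute_direction : Int × Int × Int × Int × Int × Int × Int := (0, 0, 1, 3, 1, -5, 5)

def Spec_compute_direction (x : Int) (y : Int) (increment_y : Int) (distance : Int) (line_to_check : Int) (min_y : Int) (max_y : Int) (out : List (Int × Int)) : Prop := out = compute_direction_alt x y increment_y distance line_to_check min_y max_y
instance (x : Int) (y : Int) (increment_y : Int) (distance : Int) (line_to_check : Int) (min_y : Int) (max_y : Int) (out : List (Int × Int)) : Decidable (Spec_compute_direction x y increment_y distance line_to_check min_y max_y out) := by unfold Spec_compute_direction; infer_instance

-- ===== CLAIM (what is proved, stated in full; the proofs are below) =====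
def Claim_equal_compute_direction : Prop := ∀ (x : Int) (y : Int) (increment_y : Int) (distance : Int) (line_to_check : Int) (min_y : Int) (max_y : Int), Dom_compute_direction x y increment_y distance line_to_check min_y max_y → Pre_compute_direction x y increment_y distance line_to_check min_y max_y → Spec_compute_direction x y increment_y distance line_to_check min_y max_y (compute_direction x y increment_y distance line_to_check min_y max_y)

-- ===== LEMMAS AND PROOFS =====

-- the (closed-form) number of steps B allows beyond the first point
def pvK (x : Int) (y : Int) (increment_y : Int) (distance : Int) (line_to_check : Int) (min_y : Int) (max_y : Int) : Int :=
  min (PySem.Int.floordiv (distance - |x - line_to_check|) |increment_y|)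
      (if 0 < increment_y then PySem.Int.floordiv (max_y - y) increment_y
       else PySem.Int.floordiv (y - min_y) (-increment_y))

-- the loop condition at the j-th point, phrased on the step index
lemma pv_cond_iff (x y inc distance line min_y max_y : Int)
    (hinc : inc ≠ 0) (hmn : min_y ≤ y) (hmx : y ≤ max_y)
    (j : Int) (hj : 0 ≤ j) :
    ((manhattan_distance x y line (y + j * inc) ≤ distance ∧ min_y ≤ y + j * inc ∧ y + j * inc ≤ max_y)
      ↔ j ≤ pvK x y inc distance line min_y max_y) := by
  have hs1 : 0 < |inc| := by rcases abs_cases inc with h | h <;> omega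
  have hmanh : manhattan_distance x y line (y + j * inc) = |x - line| + j * |inc| := by
    unfold manhattan_distance
    have h1 : y - (y + j * inc) = -(j * inc) := by ring
    rw [h1, abs_neg, abs_mul, abs_of_nonneg hj]
  have hK1 : (j ≤ PySem.Int.floordiv (distance - |x - line|) |inc|) ↔ j * |inc| ≤ distance - |x - line| :=
    PySem.Int.le_floordiv_iff_mul_le hs1
  rw [hmanh]
  unfold pvK
  rcases lt_or_gt_of_ne hinc with hneg | hpos
  · have hs : |inc| = -inc := abs_of_neg hneg
    have hK1 : (j ≤ PySem.Int.floordiv (distance - |x - line|) (-inc)) ↔ j * (-inc) ≤ distance - |x - line| :=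
      PySem.Int.le_floordiv_iff_mul_le (by omega)
    have hK2 : (j ≤ PySem.Int.floordiv (y - min_y) (-inc)) ↔ j * (-inc) ≤ y - min_y :=
      PySem.Int.le_floordiv_iff_mul_le (by omega)
    have hji : j * inc ≤ 0 := mul_nonpos_of_nonneg_of_nonpos hj (by omega)
    have key : j * inc = -(j * -inc) := by ring
    simp only [if_neg (by omega : ¬ 0 < inc), le_min_iff, hs, hK1, hK2]
    constructor
    · rintro ⟨h1, h2, h3⟩
      exact ⟨by linarith, by linarith⟩
    · rintro ⟨h1, h2⟩
      exact ⟨by linarith, by linarith, by linarith⟩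
  · have hs : |inc| = inc := abs_of_pos hpos
    have hK1 : (j ≤ PySem.Int.floordiv (distance - |x - line|) inc) ↔ j * inc ≤ distance - |x - line| :=
      PySem.Int.le_floordiv_iff_mul_le hpos
    have hK2 : (j ≤ PySem.Int.floordiv (max_y - y) inc) ↔ j * inc ≤ max_y - y :=
      PySem.Int.le_floordiv_iff_mul_le hpos
    have hji : 0 ≤ j * inc := mul_nonneg hj (by omega)
    simp only [if_pos hpos, le_min_iff, hs, hK1, hK2]
    constructor
    · rintro ⟨h1, h2, h3⟩
      exact ⟨by linarith, by linarith⟩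
    · rintro ⟨h1, h2⟩
      exact ⟨by linarith, by linarith, by linarith⟩

lemma pv_loop_eq (x y inc distance line min_y max_y : Int)
    (hinc : inc ≠ 0) (hmn : min_y ≤ y) (hmx : y ≤ max_y) :
    ∀ (fuel : Nat) (j : Int), 0 ≤ j → pvK x y inc distance line min_y max_y + 1 - j ≤ (fuel : Int) →
      computeLoopA x y inc distance line min_y max_y fuel (y + j * inc)
        = (List.range (pvK x y inc distance line min_y max_y + 1 - j).toNat).map
            (fun (i : Nat) => (line, y + (j + (i : Int)) * inc)) := by
  intro fuel
  induction fuel with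
  | zero =>
    intro j hj hfuel
    have : (pvK x y inc distance line min_y max_y + 1 - j).toNat = 0 := by omega
    simp [computeLoopA, this]
  | succ n ih =>
    intro j hj hfuel
    by_cases hcase : j ≤ pvK x y inc distance line min_y max_y
    · have hcond := (pv_cond_iff x y inc distance line min_y max_y hinc hmn hmx j hj).mpr hcase
      have hstep : y + j * inc + inc = y + (j + 1) * inc := by ring
      have hrec := ih (j + 1) (by omega) (by omega)
      have htn : (pvK x y inc distance line min_y max_y + 1 - j).toNat
          = (pvK x y inc distance line min_y max_y + 1 - (j + 1)).toNat + 1 := by omega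
      rw [computeLoopA, if_pos hcond, hstep, hrec, htn, List.range_succ_eq_map, List.map_cons, List.map_map]
      refine congrArg₂ _ (by norm_num) ?_
      refine List.map_congr_left (fun i _ => ?_)
      simp only [Function.comp_apply, Prod.mk.injEq, true_and]
      push_cast
      ring
    · have hcond := (pv_cond_iff x y inc distance line min_y max_y hinc hmn hmx j hj)
      have hnot : ¬ (manhattan_distance x y line (y + j * inc) ≤ distance ∧ min_y ≤ y + j * inc ∧ y + j * inc ≤ max_y) := by
        intro h; exact hcase (hcond.mp h)
      have htn : (pvK x y inc distance line min_y max_y + 1 - j).toNat = 0 := by omega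
      rw [computeLoopA, if_neg hnot, htn]
      simp

lemma pv_K_bounds (x y inc distance line min_y max_y : Int)
    (hinc : inc ≠ 0) (hd : |x - line| ≤ distance) (hmn : min_y ≤ y) (hmx : y ≤ max_y) :
    0 ≤ pvK x y inc distance line min_y max_y ∧ pvK x y inc distance line min_y max_y ≤ distance := by
  have hdx : 0 ≤ |x - line| := abs_nonneg _
  have hs1 : 0 < |inc| := by rcases abs_cases inc with h | h <;> omega
  have hc0 : manhattan_distance x y line (y + 0 * inc) ≤ distance ∧ min_y ≤ y + 0 * inc ∧ y + 0 * inc ≤ max_y := by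
    refine ⟨?_, by omega, by omega⟩
    unfold manhattan_distance
    have h1 : y - (y + 0 * inc) = 0 := by ring
    rw [h1, abs_zero]
    omega
  have h0 := (pv_cond_iff x y inc distance line min_y max_y hinc hmn hmx 0 le_rfl).mp hc0
  have hK1 : pvK x y inc distance line min_y max_y ≤ PySem.Int.floordiv (distance - |x - line|) |inc| :=
    min_le_left _ _
  have hub : PySem.Int.floordiv (distance - |x - line|) |inc| < distance + 1 := by
    rw [PySem.Int.floordiv_lt_iff_lt_mul hs1]
    nlinarith
  exact ⟨h0, by omega⟩

-- ===== VERDICT (by name: the statement is the Claim_ definition above) =====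
theorem compute_direction_spec : Claim_equal_compute_direction := by
  intro x y inc distance line min_y max_y hdom hpre
  unfold Spec_compute_direction compute_direction
  simp only [compute_direction_alt]
  by_cases hinit : |x - line| ≤ distance ∧ min_y ≤ y ∧ y ≤ max_y
  · obtain ⟨hd, hmn, hmx⟩ := hinit
    have hinc : inc ≠ 0 := fun h0 => hpre ⟨h0, hd, hmn, hmx⟩
    obtain ⟨hK0, hKd⟩ := pv_K_bounds x y inc distance line min_y max_y hinc hd hmn hmx
    have hif : ¬ (distance < |x - line| ∨ ¬ (min_y ≤ y ∧ y ≤ max_y)) := by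
      rintro (h | h)
      · omega
      · exact h ⟨hmn, hmx⟩
    rw [if_neg hif]
    have hkk : (if 0 < inc then
          min (PySem.Int.floordiv (distance - |x - line|) |inc|) (PySem.Int.floordiv (max_y - y) inc)
        else min (PySem.Int.floordiv (distance - |x - line|) |inc|) (PySem.Int.floordiv (y - min_y) (-inc)))
        = pvK x y inc distance line min_y max_y := by
      unfold pvK; split_ifs <;> rfl
    rw [hkk]
    have hfuel : pvK x y inc distance line min_y max_y + 1 - 0 ≤ ((distance.toNat + 1 : Nat) : Int) := by
      push_cast; omega
    have hloop := pv_loop_eq x y inc distance line min_y max_y hinc hmn hmx (distance.toNat + 1) 0 le_rfl hfuel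
    have hy0 : y + 0 * inc = y := by ring
    rw [hy0] at hloop
    rw [hloop]
    have htn : (pvK x y inc distance line min_y max_y + 1 - 0) = pvK x y inc distance line min_y max_y + 1 := by ring
    rw [htn]
    refine List.map_congr_left (fun i _ => ?_)
    simp
  · have hnot : ¬ (manhattan_distance x y line y ≤ distance ∧ min_y ≤ y ∧ y ≤ max_y) := by
      rintro ⟨h1, h2, h3⟩
      apply hinit
      refine ⟨?_, h2, h3⟩
      unfold manhattan_distance at h1
      simp only [sub_self, abs_zero, add_zero] at h1
      exact h1
    have hB : (distance < |x - line| ∨ ¬ (min_y ≤ y ∧ y ≤ max_y)) := by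
      by_cases h : |x - line| ≤ distance
      · right
        intro hr
        exact hinit ⟨h, hr.1, hr.2⟩
      · left
        omega
    rw [if_pos hB, computeLoopA, if_neg hnot]
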